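-- pv_equiv track=rewrite | github.com/Pedropostigo/my-database | src/sql_executer.py | _format_values_insert
-- ===== SOURCE A (Python) =====
-- def _format_values_insert(columns_table:list[str],
--                           columns_insert:list[str], values_insert:list):
--
--     counter_insert_column = 0
--     result = []
--
--     for col in columns_table:
--         if col in columns_insert:
--             result.append(str(values_insert[counter_insert_column]))
--             counter_insert_column += 1
--         else:
--             result.append('')
--     return result
-- ===== SOURCE B (Python) =====
-- def _format_values_insert(columns_table:list[str],
--                           columns_insert:list[str], values_insert:list):
--     positions = [i for i, col in enumerate(columns_table) if col in columns_insert]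
--     result = [''] * len(columns_table)
--     for pos, value in zip(positions, values_insert):
--         result[pos] = str(value)
--     return result
-- ===== Notes on version B (the rewrite author's own statement) =====
-- stated objective: alternative
-- what changed: Replaces A's single sequential-counter scan (appending as it goes) with a two-pass index-then-fill structure: first collect the positions of table columns present in columns_insert, then fill a pre-built list of empty strings by zipping positions with the values.
import Mathlib
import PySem

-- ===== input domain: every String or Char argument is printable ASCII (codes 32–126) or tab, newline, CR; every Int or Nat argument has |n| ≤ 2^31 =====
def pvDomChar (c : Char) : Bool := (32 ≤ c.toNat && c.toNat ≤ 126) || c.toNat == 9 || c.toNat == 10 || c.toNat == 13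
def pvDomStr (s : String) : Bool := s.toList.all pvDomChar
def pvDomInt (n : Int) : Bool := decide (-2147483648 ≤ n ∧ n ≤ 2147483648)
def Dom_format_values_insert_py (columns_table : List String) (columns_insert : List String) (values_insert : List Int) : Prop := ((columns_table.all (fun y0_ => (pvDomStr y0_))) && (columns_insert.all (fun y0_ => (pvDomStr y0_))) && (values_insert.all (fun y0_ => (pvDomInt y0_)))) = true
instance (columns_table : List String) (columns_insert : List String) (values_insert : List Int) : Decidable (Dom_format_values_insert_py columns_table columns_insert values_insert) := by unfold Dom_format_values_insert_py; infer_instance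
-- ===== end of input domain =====

-- B replaces A's single sequential-counter scan with a two-pass index-then-fill structure
-- (collect matching positions, then fill a pre-built row of empty strings); objective: alternative.

-- ===== PORT A =====
-- A's loop: state (counter_insert_column, result); values_insert[counter] via pyGetD
-- (the out-of-range IndexError case is excluded by Pre_ below).
def format_values_insert_py (columns_table : List String) (columns_insert : List String) (values_insert : List Int) : List String :=
  (columns_table.foldl
    (fun (st : Int × List String) col =>
      if col ∈ columns_insert then
        (st.1 + 1, st.2 ++ [PySem.Int.toStr (PySem.List.pyGetD values_insert st.1 0)])
      else
        (st.1, st.2 ++ [""]))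
    ((0 : Int), ([] : List String))).2

-- ===== PORT B =====
-- B: positions = [i for i, col in enumerate(columns_table) if col in columns_insert];
--    result = [''] * len(columns_table); for pos, value in zip(positions, values_insert): result[pos] = str(value)
def format_values_insert_py_alt (columns_table : List String) (columns_insert : List String) (values_insert : List Int) : List String :=
  let positions := ((PySem.List.enumerate columns_table).filter (fun p => decide (p.2 ∈ columns_insert))).map (·.1)
  (positions.zip values_insert).foldl
    (fun r pv => PySem.List.pySetD r pv.1 (PySem.Int.toStr pv.2))
    (List.replicate columns_table.length "")

-- ===== PRECONDITION & SPEC =====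
-- Pre_ excludes exactly the inputs on which A raises IndexError: more table columns matching
-- columns_insert than there are values to insert.
def Pre_format_values_insert_py (columns_table : List String) (columns_insert : List String) (values_insert : List Int) : Prop :=
  columns_table.countP (fun c => decide (c ∈ columns_insert)) ≤ values_insert.length
instance (columns_table : List String) (columns_insert : List String) (values_insert : List Int) : Decidable (Pre_format_values_insert_py columns_table columns_insert values_insert) := by unfold Pre_format_values_insert_py; infer_instance

def pvWitness_format_values_insert_py : List String × List String × List Int :=
  (["id", "name", "age"], ["name", "id"], [7, 3])

def Spec_format_values_insert_py (columns_table : List String) (columns_insert : List String) (values_insert : List Int) (out : List String) : Prop := out = format_values_insert_py_alt columns_table columns_insert values_insert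
instance (columns_table : List String) (columns_insert : List String) (values_insert : List Int) (out : List String) : Decidable (Spec_format_values_insert_py columns_table columns_insert values_insert out) := by unfold Spec_format_values_insert_py; infer_instance

-- ===== CLAIM (what is proved, stated in full; the proofs are below) =====
def Claim_equal_format_values_insert_py : Prop := ∀ (columns_table : List String) (columns_insert : List String) (values_insert : List Int), Dom_format_values_insert_py columns_table columns_insert values_insert → Pre_format_values_insert_py columns_table columns_insert values_insert → Spec_format_values_insert_py columns_table columns_insert values_insert (format_values_insert_py columns_table columns_insert values_insert)


-- ===== LEMMAS AND PROOFS =====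

-- Common characterisation: the intended row, computed by consuming values head-first.
def goSpec (ci : List String) : List String → List Int → List String
  | [], _ => []
  | c :: rest, vi =>
    if c ∈ ci then PySem.Int.toStr (vi.headD 0) :: goSpec ci rest vi.tail
    else "" :: goSpec ci rest vi

-- A's fold from counter k and accumulator acc.
theorem A_fold (ci : List String) (vi : List Int) (ct : List String) :
    ∀ (k : Nat) (acc : List String),
    ct.foldl
      (fun (st : Int × List String) col =>
        if col ∈ ci then
          (st.1 + 1, st.2 ++ [PySem.Int.toStr (PySem.List.pyGetD vi st.1 0)])
        else
          (st.1, st.2 ++ [""])) ((k : Int), acc)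
    = (((k + ct.countP (fun c => decide (c ∈ ci)) : Nat) : Int), acc ++ goSpec ci ct (vi.drop k)) := by
  induction ct with
  | nil => intro k acc; simp [goSpec]
  | cons c rest ih =>
    intro k acc
    by_cases h : c ∈ ci
    · simp only [List.foldl_cons, h, if_pos]
      have hk : (k : Int) + 1 = ((k + 1 : Nat) : Int) := by push_cast; ring
      rw [hk, ih (k + 1)]
      simp [goSpec, h, List.tail_drop]
      omega
    · simp only [List.foldl_cons, h, if_neg, not_false_iff]
      rw [ih k]
      simp [goSpec, h, List.append_assoc]

theorem A_eq_goSpec (ct ci : List String) (vi : List Int) :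
    format_values_insert_py ct ci vi = goSpec ci ct vi := by
  unfold format_values_insert_py
  have := A_fold ci vi ct 0 []
  simp only [Nat.cast_zero] at this
  rw [this]
  simp

-- enumerate with start s is enumerate from 0 with indices shifted by s.
theorem enumerate_shift {α : Type} (xs : List α) (s : Int) :
    PySem.List.enumerate xs s = (PySem.List.enumerate xs 0).map (fun p => (p.1 + s, p.2)) := by
  induction xs generalizing s with
  | nil => simp [PySem.List.enumerate_nil]
  | cons x xs ih =>
    rw [PySem.List.enumerate_cons, PySem.List.enumerate_cons, ih (s + 1),
      show (0 : Int) + 1 = 1 from rfl, ih 1]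
    have hf : (fun p : Int × α => ((p.1 + 1) + s, p.2)) = (fun p : Int × α => (p.1 + (s + 1), p.2)) := by
      funext p; simp; ring
    simp [List.map_map, Function.comp_def, hf]

-- Proof-side name for B's positions list.
def posOf (ct ci : List String) : List Int :=
  ((PySem.List.enumerate ct).filter (fun p => decide (p.2 ∈ ci))).map (·.1)

theorem posOf_cons (c : String) (ct ci : List String) :
    posOf (c :: ct) ci = (if c ∈ ci then [(0 : Int)] else []) ++ (posOf ct ci).map (· + 1) := by
  unfold posOf
  rw [PySem.List.enumerate_cons, show (0 : Int) + 1 = 1 from rfl, enumerate_shift ct 1]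
  by_cases h : c ∈ ci <;>
    simp [h, List.filter_map, List.map_map, Function.comp_def]

theorem posOf_nonneg (ct ci : List String) : ∀ i ∈ posOf ct ci, 0 ≤ i := by
  induction ct with
  | nil => intro i hi; simp [posOf, PySem.List.enumerate_nil] at hi
  | cons c ct ih =>
    intro i hi
    rw [posOf_cons] at hi
    rcases List.mem_append.1 hi with h1 | h2
    · by_cases h : c ∈ ci <;> simp [h] at h1; omega
    · rcases List.mem_map.1 h2 with ⟨j, hj, rfl⟩
      have := ih j hj; omega

theorem pySetD_zero_cons (x v : String) (r : List String) :
    PySem.List.pySetD (x :: r) 0 v = v :: r := by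
  simp [PySem.List.pySetD, PySem.List.pySet?, PySem.List.pyIdx?]

theorem pySetD_succ (x v : String) (r : List String) (i : Int) (hi : 0 ≤ i) :
    PySem.List.pySetD (x :: r) (i + 1) v = x :: PySem.List.pySetD r i v := by
  simp only [PySem.List.pySetD, PySem.List.pySet?, PySem.List.pyIdx?]
  have h1 : (0 : Int) ≤ i + 1 := by omega
  simp only [hi, h1, if_pos]
  by_cases h2 : i < (r.length : Int)
  · have h3 : i + 1 < ((x :: r).length : Int) := by simp; omega
    simp [h2]
    have h4 : (i + 1).toNat = i.toNat + 1 := by omega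
    simp [h4]
  · have h3 : ¬ (i + 1 < ((x :: r).length : Int)) := by simp; omega
    simp [h2]

theorem setfold_shift (l : List (Int × Int)) (x : String) (r : List String)
    (hl : ∀ p ∈ l, 0 ≤ p.1) :
    (l.map (fun p => (p.1 + 1, p.2))).foldl
        (fun r pv => PySem.List.pySetD r pv.1 (PySem.Int.toStr pv.2)) (x :: r)
    = x :: l.foldl (fun r pv => PySem.List.pySetD r pv.1 (PySem.Int.toStr pv.2)) r := by
  induction l generalizing r with
  | nil => simp
  | cons p t ih =>
    simp only [List.map_cons, List.foldl_cons]
    rw [pySetD_succ _ _ _ _ (hl p (by simp))]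
    exact ih _ (fun q hq => hl q (by simp [hq]))

theorem B_eq_goSpec (ci : List String) (ct : List String) :
    ∀ (vi : List Int), ct.countP (fun c => decide (c ∈ ci)) ≤ vi.length →
    ((posOf ct ci).zip vi).foldl
        (fun r pv => PySem.List.pySetD r pv.1 (PySem.Int.toStr pv.2))
        (List.replicate ct.length "")
    = goSpec ci ct vi := by
  induction ct with
  | nil => intro vi _; simp [posOf, PySem.List.enumerate_nil, goSpec]
  | cons c ct ih =>
    intro vi hpre
    rw [posOf_cons]
    by_cases h : c ∈ ci
    · have hcount : ct.countP (fun c => decide (c ∈ ci)) + 1 ≤ vi.length := by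
        simpa [List.countP_cons, h] using hpre
      cases vi with
      | nil => simp at hcount
      | cons v vt =>
        simp only [h, if_pos, List.singleton_append, List.zip_cons_cons,
          List.length_cons, List.replicate_succ, List.foldl_cons]
        rw [pySetD_zero_cons]
        rw [List.zip_map_left]
        have : (Prod.map (· + (1 : Int)) (id : Int → Int)) = (fun p : Int × Int => (p.1 + 1, p.2)) := by
          funext p; cases p; rfl
        rw [this, setfold_shift _ _ _ (fun p hp => posOf_nonneg ct ci p.1 (List.of_mem_zip hp).1)]
        rw [ih vt (by simp only [List.length_cons] at hcount; omega)]
        simp [goSpec, h]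
    · simp only [h, if_neg, not_false_iff, List.nil_append,
        List.length_cons, List.replicate_succ]
      rw [List.zip_map_left]
      have : (Prod.map (· + (1 : Int)) (id : Int → Int)) = (fun p : Int × Int => (p.1 + 1, p.2)) := by
        funext p; cases p; rfl
      rw [this, setfold_shift _ _ _ (fun p hp => posOf_nonneg ct ci p.1 (List.of_mem_zip hp).1)]
      rw [ih vi (by simpa [List.countP_cons, h] using hpre)]
      simp [goSpec, h]

theorem B_eq (ct ci : List String) (vi : List Int)
    (hpre : ct.countP (fun c => decide (c ∈ ci)) ≤ vi.length) :
    format_values_insert_py_alt ct ci vi = goSpec ci ct vi := by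
  unfold format_values_insert_py_alt
  exact B_eq_goSpec ci ct vi hpre

-- ===== VERDICT (by name: the statement is the Claim_ definition above) =====
theorem format_values_insert_py_spec : Claim_equal_format_values_insert_py := by
  intro ct ci vi _ hpre
  unfold Spec_format_values_insert_py
  rw [A_eq_goSpec, B_eq ct ci vi hpre]
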